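-- pv_equiv track=rewrite | github.com/super30admin/Strings-1 | Problem-2_longest_substr_no_repeat_char.py | max_unique
-- ===== SOURCE A (Python) =====
-- def max_unique(s, start, end):
--     unique_char = set()
--     for ind in range(start, end):
--         if s[ind] in unique_char:
--             return False
--         else:
--             unique_char.add(s[ind])
--
--     return True
-- ===== SOURCE B (Python) =====
-- def max_unique(s, start, end):
--     # Nested pairwise scan: fetch c = s[i], compare it against every earlier s[j]
--     # in the window; no auxiliary set is maintained.
--     for i in range(start, end):
--         c = s[i]
--         for j in range(start, i):
--             if c == s[j]:
--                 return False
--     return True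
-- ===== Notes on version B (the rewrite author's own statement) =====
-- stated objective: alternative
-- what changed: Replaces A's seen-set single pass with a nested pairwise index scan (each s[i] is compared against all earlier s[j] in the window), maintaining no auxiliary data structure.
import Mathlib
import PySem

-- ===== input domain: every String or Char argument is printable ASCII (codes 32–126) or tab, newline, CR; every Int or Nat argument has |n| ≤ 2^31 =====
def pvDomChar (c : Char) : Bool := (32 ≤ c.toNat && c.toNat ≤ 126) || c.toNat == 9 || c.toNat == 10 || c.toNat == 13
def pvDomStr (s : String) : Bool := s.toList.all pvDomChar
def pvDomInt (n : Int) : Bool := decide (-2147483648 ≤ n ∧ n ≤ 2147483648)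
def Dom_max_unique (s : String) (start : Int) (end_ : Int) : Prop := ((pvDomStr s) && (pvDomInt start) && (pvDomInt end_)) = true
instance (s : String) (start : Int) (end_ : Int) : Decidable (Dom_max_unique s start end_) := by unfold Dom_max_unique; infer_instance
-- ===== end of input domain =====

-- B replaces A's seen-set single pass with a nested pairwise index scan over the window
-- (alternative decomposition, not faster); equivalence is about the return value.

-- ===== PORT A =====
-- A's loop 'for ind in range(start, end)', ported as a counter recursion with the same
-- early exits: membership test in the seen set, else add and continue.
def mu_loopA (cs : List Char) (end_ : Int) (k : Int) (seen : PySem.Set Char) : Bool :=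
  if _h : k < end_ then
    match PySem.List.pyGet? cs k with
    | none => false   -- IndexError; outside Pre_
    | some c =>
      if PySem.Set.contains seen c then false
      else mu_loopA cs end_ (k + 1) (PySem.Set.add seen c)
  else true
termination_by (end_ - k).toNat
decreasing_by omega

def max_unique (s : String) (start : Int) (end_ : Int) : Bool :=
  mu_loopA s.toList end_ start PySem.Set.empty

-- ===== PORT B =====
-- B's inner loop 'for j in range(start, i): if c == s[j]: return False',
-- with c = s[i] already fetched; counter j running up to stop = i.
def mu_inner (cs : List Char) (c : Char) (stop : Int) (j : Int) : Bool :=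
  if _h : j < stop then
    match PySem.List.pyGet? cs j with
    | some cj => if c == cj then false else mu_inner cs c stop (j + 1)
    | none => false   -- IndexError; outside Pre_ (earlier iterations make this unreachable)
  else true
termination_by (stop - j).toNat
decreasing_by omega

-- B's outer loop 'for i in range(start, end): c = s[i]; …', counter k.
def mu_outer (cs : List Char) (start : Int) (end_ : Int) (k : Int) : Bool :=
  if h : k < end_ then
    match PySem.List.pyGet? cs k with
    | none => false   -- IndexError; outside Pre_
    | some c => if mu_inner cs c k start then mu_outer cs start end_ (k + 1) else false
  else true
termination_by (end_ - k).toNat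
decreasing_by omega

def max_unique_alt (s : String) (start : Int) (end_ : Int) : Bool :=
  mu_outer s.toList start end_ start

-- ===== PRECONDITION & SPEC =====
-- Pre_ is exactly the set of inputs on which A returns (no IndexError): the window is
-- empty, or it starts in range and either lies fully inside the string or a duplicate
-- among the in-range positions makes A return False before reaching the first bad index.
-- (The range is clamped below at -len only to keep the decision cheap; under the
-- conjunct -len ≤ start the clamp is the identity.)
def Pre_max_unique (s : String) (start : Int) (end_ : Int) : Prop :=
  end_ ≤ start ∨
  (-(s.toList.length : Int) ≤ start ∧
    (end_ ≤ (s.toList.length : Int) ∨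
     (start < (s.toList.length : Int) ∧
      ¬ ((PySem.List.pyRange (max start (-(s.toList.length : Int))) (s.toList.length : Int) 1).map
          (fun j => (PySem.List.pyGet? s.toList j).getD ' ')).Nodup)))
instance (s : String) (start : Int) (end_ : Int) : Decidable (Pre_max_unique s start end_) := by
  unfold Pre_max_unique; infer_instance

def pvWitness_max_unique : String × Int × Int := ("ab", 0, 2)

def Spec_max_unique (s : String) (start : Int) (end_ : Int) (out : Bool) : Prop := out = max_unique_alt s start end_
instance (s : String) (start : Int) (end_ : Int) (out : Bool) : Decidable (Spec_max_unique s start end_ out) := by unfold Spec_max_unique; infer_instance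

-- ===== CLAIM (what is proved, stated in full; the proofs are below) =====
def Claim_equal_max_unique : Prop := ∀ (s : String) (start : Int) (end_ : Int), Dom_max_unique s start end_ → Pre_max_unique s start end_ → Spec_max_unique s start end_ (max_unique s start end_)

-- ===== LEMMAS AND PROOFS =====

-- With all compared positions in range, B's inner loop is membership of c among them.
theorem mu_inner_all_some (cs : List Char) (c : Char) :
    ∀ (n : Nat) (stop j : Int), (stop - j).toNat ≤ n →
    (∀ x, j ≤ x → x < stop → ∃ cx, PySem.List.pyGet? cs x = some cx) →
    mu_inner cs c stop j =
      !((PySem.List.pyRange j stop 1).any (fun x => PySem.List.pyGet? cs x == some c)) := by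
  intro n
  induction n with
  | zero =>
    intro stop j hn _
    have hsj : stop ≤ j := by omega
    rw [mu_inner, dif_neg (by omega), PySem.List.pyRange_one_eq_nil hsj]
    rfl
  | succ n ih =>
    intro stop j hn hsome
    by_cases hj : j < stop
    · obtain ⟨cj, hgj⟩ := hsome j le_rfl hj
      rw [mu_inner, dif_pos hj]
      simp only [hgj]
      rw [PySem.List.pyRange_one_cons hj, List.any_cons, hgj]
      by_cases heq : c = cj
      · subst heq; simp
      · rw [if_neg (by simpa using fun h : c = cj => heq h)]
        rw [ih stop (j + 1) (by omega) (fun x h1 h2 => hsome x (by omega) h2)]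
        have : ((some cj == some c) : Bool) = false := by
          simpa using fun h : cj = c => heq h.symm
        rw [this, Bool.false_or]
    · rw [mu_inner, dif_neg hj, PySem.List.pyRange_one_eq_nil (by omega)]
      rfl

-- Membership of Set.add in terms of the old set (used to push A's invariant one step).
theorem contains_add_eq (s : PySem.Set Char) (c x : Char) (h : PySem.Set.contains s c = false) :
    PySem.Set.contains (PySem.Set.add s c) x = (PySem.Set.contains s x || c == x) := by
  simp only [PySem.Set.add, h]
  by_cases hx : x = c
  · subst hx; simp [PySem.Set.contains]
  · simp [PySem.Set.contains, hx]
    exact fun h' => absurd h'.symm hx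

-- Main loop correspondence: from position k on, with A's seen-set recording exactly the
-- characters at in-range positions [start, k), the two loops return the same Bool.
theorem mu_loop_eq (cs : List Char) (start end_ : Int) :
    ∀ (n : Nat) (k : Int) (seen : PySem.Set Char),
    (end_ - k).toNat ≤ n → start ≤ k →
    (∀ j, start ≤ j → j < k → ∃ cj, PySem.List.pyGet? cs j = some cj) →
    (∀ c, PySem.Set.contains seen c =
      (PySem.List.pyRange start k 1).any (fun j => PySem.List.pyGet? cs j == some c)) →
    mu_loopA cs end_ k seen = mu_outer cs start end_ k := by
  intro n
  induction n with
  | zero =>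
    intro k seen hn _ _ _
    rw [mu_loopA, dif_neg (by omega), mu_outer, dif_neg (by omega)]
  | succ n ih =>
    intro k seen hn hsk hsome hinv
    by_cases hke : k < end_
    · rw [mu_loopA, dif_pos hke, mu_outer, dif_pos hke]
      cases hgk : PySem.List.pyGet? cs k with
      | none => rfl
      | some c =>
        simp only
        have hinner := mu_inner_all_some cs c (k - start).toNat k start le_rfl
          (fun x h1 h2 => hsome x h1 h2)
        cases hb : (PySem.List.pyRange start k 1).any
            (fun j => PySem.List.pyGet? cs j == some c) with
        | true =>
          have hc : PySem.Set.contains seen c = true := by rw [hinv c, hb]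
          rw [hc, hinner, hb]
          simp
        | false =>
          have hcontains : PySem.Set.contains seen c = false := by rw [hinv c, hb]
          have hrec : mu_loopA cs end_ (k + 1) (PySem.Set.add seen c) =
              mu_outer cs start end_ (k + 1) := by
            apply ih (k + 1) (PySem.Set.add seen c) (by omega) (by omega)
            · intro j h1 h2
              by_cases hjk : j = k
              · exact ⟨c, hjk ▸ hgk⟩
              · exact hsome j h1 (by omega)
            · intro c'
              rw [contains_add_eq seen c c' hcontains,
                PySem.List.pyRange_one_succ_right hsk, List.any_append, hinv c']
              simp [hgk]
          rw [hcontains, hinner, hb]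
          simpa using hrec
    · rw [mu_loopA, dif_neg hke, mu_outer, dif_neg hke]

-- ===== VERDICT (by name: the statement is the Claim_ definition above) =====
theorem max_unique_spec : Claim_equal_max_unique := by
  intro s start end_ _ _
  unfold Spec_max_unique max_unique max_unique_alt
  apply mu_loop_eq s.toList start end_ (end_ - start).toNat start PySem.Set.empty le_rfl le_rfl
  · intro j h1 h2; omega
  · intro c
    rw [PySem.List.pyRange_one_eq_nil (le_refl start)]
    rfl
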